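-- pv_equiv track=rewrite | github.com/bradfordja/python-coding-code-snipped | FindPairsWithSumLessThenK.py | get_all_pairs_with_sum_less_than_k
-- ===== SOURCE A (Python) =====
-- def get_all_pairs_with_sum_less_than_k(A, K):
--     pairs_list = []
--     A.sort()  # Sort the list in ascending order
--     left, right = 0, len(A) - 1
--
--     while left < right:
--         current_sum = A[left] + A[right]
--
--         if current_sum < K:
--             pairs_list.extend([(A[left], A[i]) for i in range(right, left, -1)])
--             left += 1
--         else:
--             right -= 1
--
--     return pairs_list
-- ===== SOURCE B (Python) =====
-- def get_all_pairs_with_sum_less_than_k(A, K):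
--     # Like A, sorts the argument in place; return value is what's compared.
--     A.sort()
--     n = len(A)
--     res = []
--     for left in range(n - 1):
--         res.extend((A[left], A[i]) for i in range(n - 1, left, -1) if A[left] + A[i] < K)
--     return res
-- ===== Notes on version B (the rewrite author's own statement) =====
-- stated objective: simpler
-- what changed: Replaces the two-pointer sweep (mutable left/right state, early stop) by an independent per-left descending filtered scan over the sorted list; sortedness makes the filtered scan emit exactly the two-pointer's pairs in the same order.
import Mathlib
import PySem

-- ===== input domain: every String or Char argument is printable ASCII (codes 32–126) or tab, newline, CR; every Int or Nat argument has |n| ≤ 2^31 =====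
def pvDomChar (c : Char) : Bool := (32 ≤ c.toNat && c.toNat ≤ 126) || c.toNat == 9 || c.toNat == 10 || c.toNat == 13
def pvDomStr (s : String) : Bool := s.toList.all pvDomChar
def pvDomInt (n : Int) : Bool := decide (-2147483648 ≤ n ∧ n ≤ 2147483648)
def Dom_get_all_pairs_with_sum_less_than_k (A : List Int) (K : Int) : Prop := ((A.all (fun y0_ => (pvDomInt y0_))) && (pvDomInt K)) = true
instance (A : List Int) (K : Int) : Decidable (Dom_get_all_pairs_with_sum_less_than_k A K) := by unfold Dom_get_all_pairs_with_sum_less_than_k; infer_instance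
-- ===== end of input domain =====

-- B replaces A's two-pointer sweep by an independent per-left descending filtered scan over the
-- sorted list (simpler: no mutable left/right state). Both Pythons sort the argument in place;
-- the equivalence proved here is about the RETURN value.

-- ===== PORT A =====
-- while left < right: … (two-pointer).  All indexed accesses are provably in range
-- (0 ≤ left < right ≤ len S - 1), so pyGetD _ _ 0 is exact here.
def pvLoopA (S : List Int) (K : Int) (left right : Int) (acc : List (Int × Int)) :
    List (Int × Int) :=
  if _h : left < right then
    let a := PySem.List.pyGetD S left 0
    let b := PySem.List.pyGetD S right 0
    if a + b < K then
      pvLoopA S K (left + 1) right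
        (acc ++ (PySem.List.pyRange right left (-1)).map
          (fun i => (a, PySem.List.pyGetD S i 0)))
    else
      pvLoopA S K left (right - 1) acc
  else acc
termination_by (right - left).toNat
decreasing_by all_goals omega

def get_all_pairs_with_sum_less_than_k (A : List Int) (K : Int) : List (Int × Int) :=
  let S := PySem.List.sorted A (fun x => x) false
  pvLoopA S K 0 ((S.length : Int) - 1) []

-- ===== PORT B =====
-- for left in range(n-1): res.extend((A[left], A[i]) for i in range(n-1, left, -1) if A[left]+A[i] < K)
def pvInnerB (S : List Int) (K : Int) (n left : Int) : List (Int × Int) :=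
  ((PySem.List.pyRange (n - 1) left (-1)).filter
      (fun i => decide (PySem.List.pyGetD S left 0 + PySem.List.pyGetD S i 0 < K))).map
    (fun i => (PySem.List.pyGetD S left 0, PySem.List.pyGetD S i 0))

def get_all_pairs_with_sum_less_than_k_alt (A : List Int) (K : Int) : List (Int × Int) :=
  let S := PySem.List.sorted A (fun x => x) false
  let n : Int := S.length
  (PySem.List.pyRange 0 (n - 1) 1).foldl (fun res left => res ++ pvInnerB S K n left) []

-- ===== PRECONDITION & SPEC =====
def Spec_get_all_pairs_with_sum_less_than_k (A : List Int) (K : Int) (out : List (Int × Int)) : Prop := out = get_all_pairs_with_sum_less_than_k_alt A K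
instance (A : List Int) (K : Int) (out : List (Int × Int)) : Decidable (Spec_get_all_pairs_with_sum_less_than_k A K out) := by unfold Spec_get_all_pairs_with_sum_less_than_k; infer_instance

-- ===== CLAIM (what is proved, stated in full; the proofs are below) =====
def Claim_equal_get_all_pairs_with_sum_less_than_k : Prop := ∀ (A : List Int) (K : Int), Dom_get_all_pairs_with_sum_less_than_k A K → Spec_get_all_pairs_with_sum_less_than_k A K (get_all_pairs_with_sum_less_than_k A K)

-- ===== LEMMAS AND PROOFS =====

-- Monotone access into a ≤-sorted list (Int indices, in range).
lemma pv_mono (S : List Int) (hp : S.Pairwise (· ≤ ·)) (i j : Int)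
    (h0 : 0 ≤ i) (hij : i ≤ j) (hj : j < (S.length : Int)) :
    PySem.List.pyGetD S i 0 ≤ PySem.List.pyGetD S j 0 := by
  rw [PySem.List.pyGetD_eq_getElem S 0 h0 (by omega),
      PySem.List.pyGetD_eq_getElem S 0 (by omega) hj]
  rcases eq_or_lt_of_le hij with h | h
  · simp [h]
  · exact (List.pairwise_iff_getElem.mp hp) i.toNat j.toNat (by omega) (by omega) (by omega)

-- A fold that appends only empty lists returns its accumulator.
lemma pv_foldl_nil {α β : Type} (f : α → List β) (L : List α)
    (h : ∀ l ∈ L, f l = []) (acc : List β) :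
    L.foldl (fun res l => res ++ f l) acc = acc := by
  induction L generalizing acc with
  | nil => rfl
  | cons x xs ih =>
      simp only [List.foldl_cons, h x (by simp)]
      simpa using ih (fun l hl => h l (by simp [hl])) acc

-- Once the two-pointer loop has stopped at left = right, every remaining inner scan of B is empty.
lemma pv_tail_nil (S : List Int) (K : Int) (hp : S.Pairwise (· ≤ ·)) (left : Int)
    (h0 : 0 ≤ left)
    (hinv : ∀ j : Int, left < j → j < (S.length : Int) →
      K ≤ PySem.List.pyGetD S left 0 + PySem.List.pyGetD S j 0)
    (acc : List (Int × Int)) :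
    (PySem.List.pyRange left ((S.length : Int) - 1) 1).foldl
      (fun res l => res ++ pvInnerB S K (S.length : Int) l) acc = acc := by
  apply pv_foldl_nil
  intro l hl
  have hl' := PySem.List.mem_pyRange_one.mp hl
  unfold pvInnerB
  rw [List.filter_eq_nil_iff.mpr, List.map_nil]
  intro i hi
  have hi' := PySem.List.mem_pyRange_neg_one.mp hi
  simp only [decide_eq_true_eq, not_lt]
  have h1 : K ≤ PySem.List.pyGetD S left 0 + PySem.List.pyGetD S i 0 :=
    hinv i (by omega) (by omega)
  have h2 : PySem.List.pyGetD S left 0 ≤ PySem.List.pyGetD S l 0 :=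
    pv_mono S hp left l h0 (by omega) (by omega)
  omega

-- When the current pair sum is below K, B's inner filtered scan at `left` is exactly
-- the pairs A emits: indices right, right-1, …, left+1.
lemma pv_inner_full (S : List Int) (K : Int) (hp : S.Pairwise (· ≤ ·)) (left right : Int)
    (h0 : 0 ≤ left) (h : left < right) (hr : right ≤ (S.length : Int) - 1)
    (hinv : ∀ j : Int, right < j → j < (S.length : Int) →
      K ≤ PySem.List.pyGetD S left 0 + PySem.List.pyGetD S j 0)
    (hs : PySem.List.pyGetD S left 0 + PySem.List.pyGetD S right 0 < K) :
    pvInnerB S K (S.length : Int) left =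
      (PySem.List.pyRange right left (-1)).map
        (fun i => (PySem.List.pyGetD S left 0, PySem.List.pyGetD S i 0)) := by
  unfold pvInnerB
  rw [PySem.List.pyRange_neg_one_eq_reverse ((S.length : Int) - 1) left, List.filter_reverse]
  have hsplit : PySem.List.pyRange (left + 1) ((S.length : Int) - 1 + 1) =
      PySem.List.pyRange (left + 1) (right + 1) ++
      PySem.List.pyRange (right + 1) ((S.length : Int) - 1 + 1) :=
    PySem.List.pyRange_one_append _ _ _ (by omega) (by omega)
  rw [hsplit, List.filter_append]
  have h1 : (PySem.List.pyRange (left + 1) (right + 1)).filter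
      (fun i => decide (PySem.List.pyGetD S left 0 + PySem.List.pyGetD S i 0 < K)) =
      PySem.List.pyRange (left + 1) (right + 1) := by
    apply List.filter_eq_self.mpr
    intro i hi
    have hi' := PySem.List.mem_pyRange_one.mp hi
    simp only [decide_eq_true_eq]
    have : PySem.List.pyGetD S i 0 ≤ PySem.List.pyGetD S right 0 :=
      pv_mono S hp i right (by omega) (by omega) (by omega)
    omega
  have h2 : (PySem.List.pyRange (right + 1) ((S.length : Int) - 1 + 1)).filter
      (fun i => decide (PySem.List.pyGetD S left 0 + PySem.List.pyGetD S i 0 < K)) = [] := by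
    apply List.filter_eq_nil_iff.mpr
    intro i hi
    have hi' := PySem.List.mem_pyRange_one.mp hi
    simp only [decide_eq_true_eq, not_lt]
    exact hinv i (by omega) (by omega)
  rw [h1, h2, List.append_nil, PySem.List.pyRange_neg_one_eq_reverse right left, List.map_reverse]

-- Main invariant: the two-pointer loop from (left, right) equals B's remaining folds from `left`,
-- provided every index beyond `right` already failed the sum test for `left`.
lemma pv_main (S : List Int) (K : Int) (hp : S.Pairwise (· ≤ ·)) :
    ∀ (m : Nat) (left right : Int) (acc : List (Int × Int)),
    (right - left).toNat ≤ m → 0 ≤ left → left ≤ right → right ≤ (S.length : Int) - 1 →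
    (∀ j : Int, right < j → j < (S.length : Int) →
      K ≤ PySem.List.pyGetD S left 0 + PySem.List.pyGetD S j 0) →
    pvLoopA S K left right acc =
      (PySem.List.pyRange left ((S.length : Int) - 1) 1).foldl
        (fun res l => res ++ pvInnerB S K (S.length : Int) l) acc := by
  intro m
  induction m with
  | zero =>
      intro left right acc hm h0 hlr hr hinv
      have heq : left = right := by omega
      rw [pvLoopA, dif_neg (by omega)]
      exact (pv_tail_nil S K hp left h0 (by intro j hj hj'; exact hinv j (by omega) hj') acc).symm
  | succ m ih =>
      intro left right acc hm h0 hlr hr hinv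
      by_cases h : left < right
      · rw [pvLoopA, dif_pos h]
        simp only []
        by_cases hs : PySem.List.pyGetD S left 0 + PySem.List.pyGetD S right 0 < K
        · rw [if_pos hs]
          have hnext : ∀ j : Int, right < j → j < (S.length : Int) →
              K ≤ PySem.List.pyGetD S (left + 1) 0 + PySem.List.pyGetD S j 0 := by
            intro j hj hj'
            have := pv_mono S hp left (left + 1) h0 (by omega) (by omega)
            have := hinv j hj hj'
            omega
          rw [ih (left + 1) right _ (by omega) (by omega) (by omega) hr hnext]
          rw [PySem.List.pyRange_one_cons (show left < (S.length : Int) - 1 by omega),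
              List.foldl_cons]
          rw [pv_inner_full S K hp left right h0 h hr hinv hs]
        · rw [if_neg hs]
          have hnext : ∀ j : Int, right - 1 < j → j < (S.length : Int) →
              K ≤ PySem.List.pyGetD S left 0 + PySem.List.pyGetD S j 0 := by
            intro j hj hj'
            by_cases hjr : j = right
            · subst hjr; omega
            · exact hinv j (by omega) hj'
          exact ih left (right - 1) acc (by omega) h0 (by omega) (by omega) hnext
      · have heq : left = right := by omega
        rw [pvLoopA, dif_neg h]
        exact (pv_tail_nil S K hp left h0 (by intro j hj hj'; exact hinv j (by omega) hj') acc).symm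

-- ===== VERDICT (by name: the statement is the Claim_ definition above) =====
theorem get_all_pairs_with_sum_less_than_k_spec : Claim_equal_get_all_pairs_with_sum_less_than_k := by
  intro A K _
  unfold Spec_get_all_pairs_with_sum_less_than_k
  unfold get_all_pairs_with_sum_less_than_k get_all_pairs_with_sum_less_than_k_alt
  simp only []
  set S := PySem.List.sorted A (fun x => x) false with hS
  have hp : S.Pairwise (· ≤ ·) := PySem.List.sorted_pairwise A (fun x => x)
  by_cases hn : S.length = 0
  · rw [pvLoopA, dif_neg (by simp [hn]), PySem.List.pyRange_one_eq_nil (by simp [hn])]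
    rfl
  · exact pv_main S K hp ((S.length : Int) - 0).toNat 0 ((S.length : Int) - 1) []
      (by omega) le_rfl (by omega) (by omega) (by intro j hj hj'; omega)
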